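-- pv_equiv track=rewrite | github.com/tatsuya4649/mysqlshard | nodes/add_node.py | _hash_smallest
-- ===== SOURCE A (Python) =====
-- def _hash_smallest(hashs,smallest,threshold):
-- 	results = list()
-- 	for h in hashs:
-- 		if smallest is None:
-- 			if threshold < h:
-- 				results.append(h)
-- 		else:
-- 			if h < smallest and threshold < h:
-- 				results.append(h)
-- 	if len(results) == 0:
-- 		return None
-- 	else:
-- 		return min(results)
-- ===== SOURCE B (Python) =====
-- def _hash_smallest(hashs, smallest, threshold):
--     best = None
--     for h in hashs:
--         if threshold < h and (smallest is None or h < smallest):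
--             if best is None or h < best:
--                 best = h
--     return best
-- ===== Notes on version B (the rewrite author's own statement) =====
-- stated objective: simpler
-- what changed: Single pass maintaining a running minimum scalar instead of building a candidate list and calling min on it afterwards.
import Mathlib
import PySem

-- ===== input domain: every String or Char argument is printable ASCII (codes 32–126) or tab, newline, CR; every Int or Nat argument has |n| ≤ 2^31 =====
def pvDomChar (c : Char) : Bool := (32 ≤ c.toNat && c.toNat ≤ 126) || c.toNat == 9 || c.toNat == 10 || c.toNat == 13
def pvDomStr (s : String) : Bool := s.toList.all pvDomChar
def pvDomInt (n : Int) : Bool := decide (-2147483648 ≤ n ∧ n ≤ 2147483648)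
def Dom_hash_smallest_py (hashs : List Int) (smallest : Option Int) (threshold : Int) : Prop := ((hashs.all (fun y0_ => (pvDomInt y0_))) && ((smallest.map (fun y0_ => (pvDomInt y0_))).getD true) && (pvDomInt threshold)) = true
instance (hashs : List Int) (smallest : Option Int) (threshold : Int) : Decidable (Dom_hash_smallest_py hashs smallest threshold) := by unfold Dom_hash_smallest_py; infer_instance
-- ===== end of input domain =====

-- ===== PORT A =====
-- B is a single running-minimum pass instead of A's collect-then-min; same O(n), simpler state (objective: simpler).
def hash_smallest_py (hashs : List Int) (smallest : Option Int) (threshold : Int) : Option Int :=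
  let results := hashs.foldl (fun results h =>
    match smallest with
    | none => if threshold < h then results ++ [h] else results
    | some s => if h < s ∧ threshold < h then results ++ [h] else results) []
  if results.length = 0 then none
  else PySem.List.min? results (fun x => x)

-- ===== PORT B =====
-- condition 'threshold < h and (smallest is None or h < smallest)' as a Bool predicate
def pvCond (smallest : Option Int) (threshold : Int) (h : Int) : Bool :=
  decide (threshold < h) && (match smallest with | none => true | some s => decide (h < s))

-- 'if best is None or h < best: best = h'
def pvStep (best : Option Int) (h : Int) : Option Int :=
  match best with
  | none => some h
  | some b => if h < b then some h else some b

def hash_smallest_py_alt (hashs : List Int) (smallest : Option Int) (threshold : Int) : Option Int :=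
  hashs.foldl (fun best h => if pvCond smallest threshold h then pvStep best h else best) none

-- ===== PRECONDITION & SPEC =====

def Spec_hash_smallest_py (hashs : List Int) (smallest : Option Int) (threshold : Int) (out : Option Int) : Prop := out = hash_smallest_py_alt hashs smallest threshold
instance (hashs : List Int) (smallest : Option Int) (threshold : Int) (out : Option Int) : Decidable (Spec_hash_smallest_py hashs smallest threshold out) := by unfold Spec_hash_smallest_py; infer_instance

-- ===== CLAIM (what is proved, stated in full; the proofs are below) =====
def Claim_equal_hash_smallest_py : Prop := ∀ (hashs : List Int) (smallest : Option Int) (threshold : Int), Dom_hash_smallest_py hashs smallest threshold → Spec_hash_smallest_py hashs smallest threshold (hash_smallest_py hashs smallest threshold)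

-- ===== LEMMAS AND PROOFS =====
theorem pvA_fold (smallest : Option Int) (threshold : Int) :
    ∀ (hashs : List Int) (acc : List Int),
      hashs.foldl (fun results h =>
        match smallest with
        | none => if threshold < h then results ++ [h] else results
        | some s => if h < s ∧ threshold < h then results ++ [h] else results) acc
      = acc ++ hashs.filter (pvCond smallest threshold) := by
  intro hashs
  induction hashs with
  | nil => intro acc; simp
  | cons h t ih =>
    intro acc
    cases smallest with
    | none =>
      by_cases hc : threshold < h <;>
        simp [List.foldl, pvCond, hc, ih, List.filter]
    | some s =>
      by_cases hc1 : h < s <;> by_cases hc2 : threshold < h <;>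
        simp [List.foldl, pvCond, hc1, hc2, ih, List.filter]

theorem pvB_fold (smallest : Option Int) (threshold : Int) :
    ∀ (hashs : List Int) (best : Option Int),
      hashs.foldl (fun best h => if pvCond smallest threshold h then pvStep best h else best) best
      = (hashs.filter (pvCond smallest threshold)).foldl pvStep best := by
  intro hashs
  induction hashs with
  | nil => intro best; simp
  | cons h t ih =>
    intro best
    rw [List.foldl_cons, List.filter_cons]
    by_cases hc : pvCond smallest threshold h = true
    · rw [if_pos hc, ih, if_pos hc, List.foldl_cons]
    · rw [if_neg hc, ih, if_neg hc]

theorem pvStep_some (a : Int) : ∀ (l : List Int), l.foldl pvStep (some a) = some (l.foldl min a) := by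
  intro l
  induction l generalizing a with
  | nil => simp
  | cons h t ih =>
    simp only [List.foldl, pvStep]
    by_cases hc : h < a
    · rw [if_pos hc, ih]
      have : min a h = h := by omega
      rw [this]
    · rw [if_neg hc, ih]
      have : min a h = a := by omega
      rw [this]

-- ===== VERDICT (by name: the statement is the Claim_ definition above) =====
theorem hash_smallest_py_spec : Claim_equal_hash_smallest_py := by
  intro hashs smallest threshold _
  unfold Spec_hash_smallest_py hash_smallest_py hash_smallest_py_alt
  rw [pvA_fold, pvB_fold]
  simp only [List.nil_append]
  cases hf : hashs.filter (pvCond smallest threshold) with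
  | nil => simp
  | cons x t =>
    simp only [List.length_cons, List.foldl]
    rw [if_neg (by simp), PySem.List.min?_id_cons]
    have : pvStep none x = some x := rfl
    rw [this, pvStep_some]
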